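-- pv_equiv track=rewrite | github.com/kaldap/advent-of-code | 2021/day12.py | stupid_revisiting_rule
-- ===== SOURCE A (Python) =====
-- def stupid_revisiting_rule(node, path):
--     # Start and end cannot be revisited
--     if node == 'start' or node == 'end':
--         return False
--     if not node[0].islower():
--         return True
--
--     # Find small cave duplicates
--     c = 0
--     d = set()
--     for cave in path:
--         if not cave[0].islower():
--             continue
--         if cave in d:
--             return False
--         d.add(cave)
--     return True
-- ===== SOURCE B (Python) =====
-- def stupid_revisiting_rule(node, path):
--     # Start and end cannot be revisited
--     if node == 'start' or node == 'end':
--         return False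
--     if not node[0].islower():
--         return True
--     # Sort the small caves and check that no two adjacent entries coincide:
--     # a duplicate small cave exists iff sorting brings two equal names together.
--     smalls = sorted(c for c in path if c[:1].islower())
--     return all(x != y for x, y in zip(smalls, smalls[1:]))
-- ===== Notes on version B (the rewrite author's own statement) =====
-- stated objective: alternative
-- what changed: Replaces A's incremental seen-set scan with early exit by a sort-then-adjacent-compare algorithm: sort the small caves and return whether no two neighbours are equal (no set, no short-circuit); B filters with c[:1] so it returns where A's c[0] raises on an empty string.
import Mathlib
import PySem

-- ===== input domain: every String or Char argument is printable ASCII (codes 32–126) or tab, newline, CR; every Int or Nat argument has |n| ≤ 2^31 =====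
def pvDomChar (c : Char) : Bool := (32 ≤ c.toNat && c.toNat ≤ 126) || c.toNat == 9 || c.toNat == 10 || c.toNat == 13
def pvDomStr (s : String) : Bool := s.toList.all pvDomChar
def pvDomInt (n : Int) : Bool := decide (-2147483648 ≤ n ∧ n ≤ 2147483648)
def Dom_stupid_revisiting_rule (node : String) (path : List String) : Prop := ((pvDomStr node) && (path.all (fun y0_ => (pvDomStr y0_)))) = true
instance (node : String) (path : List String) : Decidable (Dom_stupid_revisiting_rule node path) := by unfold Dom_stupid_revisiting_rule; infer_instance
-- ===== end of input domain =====

-- B sorts the small caves and checks that no two adjacent entries are equal, instead of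
-- A's incremental seen-set scan with an early-exit membership test (objective: alternative).


-- ===== PORT A =====
-- s[0].islower() — exact for s ≠ "" (Pre_ excludes the empty-string IndexError)
def pvFirstIslower (s : String) : Bool :=
  match s.toList with
  | [] => false
  | c :: _ => PySem.Chars.islower c

-- the for-loop of A: seen-set d, early return False on a repeated small cave
def srrLoop : List String → PySem.Set String → Bool
  | [], _ => true
  | cave :: rest, d =>
    if !(pvFirstIslower cave) then srrLoop rest d
    else if PySem.Set.contains d cave then false
    else srrLoop rest (PySem.Set.add d cave)

def stupid_revisiting_rule (node : String) (path : List String) : Bool :=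
  if node == "start" || node == "end" then false
  else if !(pvFirstIslower node) then true
  else srrLoop path PySem.Set.empty

-- ===== PORT B =====
def stupid_revisiting_rule_alt (node : String) (path : List String) : Bool :=
  if node == "start" || node == "end" then false
  else if !(pvFirstIslower node) then true
  else
    -- c[:1].islower() — exact and total: the slice of "" is "" (islower() False), else the first char
    let smalls := PySem.List.sorted (path.filter (fun c => pvFirstIslower c)) (fun x => x) false
    -- all(x != y for x, y in zip(smalls, smalls[1:])); smalls[1:] = drop 1
    (smalls.zip (smalls.drop 1)).all (fun p => !(p.1 == p.2))

-- ===== PRECONDITION & SPEC =====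
-- Pre_ excludes exactly the inputs on which the Python A raises IndexError at s[0]:
-- an empty node reaching node[0], or a lowercase node whose loop reaches an empty string
-- in path (i.e. "" ∈ path with no duplicate small cave before the first ""); B, which
-- slices with c[:1], simply treats the empty string as not small and returns there.
def Pre_stupid_revisiting_rule (node : String) (path : List String) : Prop :=
  node = "start" ∨ node = "end" ∨
    (node ≠ "" ∧ (pvFirstIslower node = false ∨ "" ∉ path ∨
      ¬ ((path.takeWhile (fun c => c ≠ "")).filter (fun c => pvFirstIslower c)).Nodup))
instance (node : String) (path : List String) : Decidable (Pre_stupid_revisiting_rule node path) := by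
  unfold Pre_stupid_revisiting_rule; infer_instance
def pvWitness_stupid_revisiting_rule : String × List String := ("a", ["b", "a", "AB"])

def Spec_stupid_revisiting_rule (node : String) (path : List String) (out : Bool) : Prop := out = stupid_revisiting_rule_alt node path
instance (node : String) (path : List String) (out : Bool) : Decidable (Spec_stupid_revisiting_rule node path out) := by unfold Spec_stupid_revisiting_rule; infer_instance

-- ===== CLAIM (what is proved, stated in full; the proofs are below) =====
def Claim_equal_stupid_revisiting_rule : Prop := ∀ (node : String) (path : List String), Dom_stupid_revisiting_rule node path → Pre_stupid_revisiting_rule node path → Spec_stupid_revisiting_rule node path (stupid_revisiting_rule node path)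

-- ===== LEMMAS AND PROOFS =====

-- A's loop equals "the small caves are pairwise distinct and all fresh w.r.t. d"
theorem pv_srrLoop_eq (l : List String) (d : PySem.Set String) :
    srrLoop l d =
      decide ((l.filter (fun c => pvFirstIslower c)).Nodup ∧
        ∀ x ∈ l.filter (fun c => pvFirstIslower c), x ∉ d) := by
  induction l generalizing d with
  | nil => simp [srrLoop]
  | cons cave rest ih =>
    have hstep : srrLoop (cave :: rest) d =
        (if !(pvFirstIslower cave) then srrLoop rest d
         else if PySem.Set.contains d cave then false
         else srrLoop rest (PySem.Set.add d cave)) := rfl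
    rw [hstep]
    by_cases hc : pvFirstIslower cave
    · rw [List.filter_cons_of_pos (by simpa using hc)]
      by_cases hd : cave ∈ d
      · have hcont : PySem.Set.contains d cave = true := by
          simpa [PySem.Set.contains]
        simp [hc, hd]
      · have hcont : PySem.Set.contains d cave = false := by
          simpa [PySem.Set.contains]
        simp only [hc, Bool.not_true, Bool.false_eq_true, if_false, hcont, ih]
        rw [decide_eq_decide]
        have hmemadd : ∀ y, y ∈ PySem.Set.add d cave ↔ y ∈ d ∨ y = cave := by
          intro y; simp [PySem.Set.add, hd]
        simp only [List.nodup_cons, List.mem_cons]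
        constructor
        · rintro ⟨hnd, hall⟩
          have hall' : ∀ y ∈ rest.filter (fun c => pvFirstIslower c), ¬(y ∈ d ∨ y = cave) := by
            intro y hy
            have := hall y hy
            rw [hmemadd] at this
            exact this
          refine ⟨⟨fun hcm => (hall' cave hcm) (Or.inr rfl), hnd⟩, ?_⟩
          rintro y (rfl | hy)
          · exact hd
          · exact fun hys => (hall' y hy) (Or.inl hys)
        · rintro ⟨⟨hcm, hnd⟩, hall⟩
          refine ⟨hnd, ?_⟩
          intro y hy
          rw [hmemadd]
          rintro (hyd | rfl)
          · exact (hall y (Or.inr hy)) hyd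
          · exact hcm hy
    · rw [List.filter_cons_of_neg (by simpa using hc)]
      simp [hc, ih]

-- on a ≤-sorted list, "no two adjacent entries are equal" is exactly Nodup
theorem pv_adj_distinct_eq_nodup (ss : List String) (h : ss.Pairwise (· ≤ ·)) :
    ((ss.zip (ss.drop 1)).all (fun p => !(p.1 == p.2))) = decide ss.Nodup := by
  induction ss with
  | nil => simp
  | cons a t ih =>
    match t, h with
    | [], _ => simp
    | b :: t, h =>
      have hpair := List.pairwise_cons.mp h
      have hab : a ≤ b := hpair.1 b (by simp)
      have htail := ih hpair.2
      have hble : ∀ x ∈ t, b ≤ x := (List.pairwise_cons.mp hpair.2).1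
      simp only [List.drop_one, List.tail_cons, List.zip_cons_cons, List.all_cons] at htail ⊢
      rw [htail, Bool.eq_iff_iff]
      simp only [Bool.and_eq_true, Bool.not_eq_true', beq_eq_false_iff_ne, ne_eq,
        decide_eq_true_eq, List.nodup_cons, List.mem_cons]
      constructor
      · rintro ⟨hne, hbt, hnd⟩
        refine ⟨?_, hbt, hnd⟩
        rintro (rfl | hat)
        · exact hne rfl
        · exact hne (le_antisymm hab (hble a hat))
      · rintro ⟨hna, hbt, hnd⟩
        exact ⟨fun he => hna (Or.inl he), hbt, hnd⟩

-- ===== VERDICT (by name: the statement is the Claim_ definition above) =====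
theorem stupid_revisiting_rule_spec : Claim_equal_stupid_revisiting_rule := by
  intro node path _ _
  unfold Spec_stupid_revisiting_rule stupid_revisiting_rule stupid_revisiting_rule_alt
  split
  · rfl
  split
  · rfl
  · rw [pv_srrLoop_eq]
    set smalls := path.filter (fun c => pvFirstIslower c) with hs
    set ss := PySem.List.sorted smalls (fun x => x) false with hss
    have hsorted : ss.Pairwise (· ≤ ·) := by
      simpa using PySem.List.sorted_pairwise smalls (fun x => x)
    have hperm : ss.Perm smalls := PySem.List.sorted_perm smalls (fun x => x) false
    rw [pv_adj_distinct_eq_nodup ss hsorted, decide_eq_decide, hperm.nodup_iff]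
    simp [PySem.Set.empty]
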